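-- pv_equiv track=rewrite | github.com/ShoolerM/Pietro | models/planning_model.py | parse_outline_tasks
-- ===== SOURCE A (Python) =====
-- from typing import List, Optional, Dict, Any
--
-- def parse_outline_tasks(outline_text: str) -> List[str]:
--     """Parse outline markdown into list of task descriptions.
--
--     Extracts unchecked [ ] items from the outline.
--
--     Args:
--         outline_text: Markdown checklist text
--
--     Returns:
--         List of task descriptions (unchecked items only)
--     """
--     tasks = []
--     for line in outline_text.strip().split("\n"):
--         line = line.strip()
--         # Look for unchecked markdown checkboxes
--         if line.startswith("- [ ]") or line.startswith("* [ ]"):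
--             # Extract task text after checkbox
--             task = line[5:].strip()
--             if task:
--                 tasks.append(task)
--     return tasks
-- ===== SOURCE B (Python) =====
-- def parse_outline_tasks(outline_text):
--     """Single-pass character state machine: no per-line splitting or stripping.
--
--     States: 0 = skipping line indentation; 1..4 = bullet seen, matched
--     PREFIX[:state-1] of " [ ]"; 5 = collecting task text; -1 = line rejected.
--     A newline finalizes the current line and resets the state.
--     """
--     WS = " \t\r"
--     PREFIX = " [ ]"
--     tasks = []
--     state = 0
--     buf = ""
--     for ch in outline_text + "\n":
--         if ch == "\n":
--             if state == 5:
--                 task = buf.strip()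
--                 if task:
--                     tasks.append(task)
--             state, buf = 0, ""
--         elif state == 5:
--             buf += ch
--         elif state == -1:
--             pass
--         elif state == 0:
--             if ch == "-" or ch == "*":
--                 state = 1
--             elif ch not in WS:
--                 state = -1
--         else:
--             if ch == PREFIX[state - 1]:
--                 state += 1
--             else:
--                 state = -1
--     return tasks
-- ===== Notes on version B (the rewrite author's own statement) =====
-- stated objective: alternative
-- what changed: A strips the whole text, splits it into lines, strips each line and tests the checkbox prefix; B is a single pass over the characters with a small state machine (skip indent / match '- [ ]' / collect task text), never materialising the line list or calling per-line strip.
import Mathlib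
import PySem

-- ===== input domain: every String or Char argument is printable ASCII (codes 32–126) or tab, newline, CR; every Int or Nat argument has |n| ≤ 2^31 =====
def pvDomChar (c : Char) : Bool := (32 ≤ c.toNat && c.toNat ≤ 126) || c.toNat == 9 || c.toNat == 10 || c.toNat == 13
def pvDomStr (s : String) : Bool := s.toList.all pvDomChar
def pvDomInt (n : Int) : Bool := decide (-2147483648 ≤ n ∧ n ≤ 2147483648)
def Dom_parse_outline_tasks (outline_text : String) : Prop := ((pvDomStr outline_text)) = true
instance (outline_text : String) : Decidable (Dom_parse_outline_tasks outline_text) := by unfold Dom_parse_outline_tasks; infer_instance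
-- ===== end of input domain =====

-- B replaces A's strip/split/per-line-strip pipeline by a single character-level
-- state machine pass; same result, stated for printable-ASCII+tab/newline/CR input.

-- ===== PORT A =====
-- A: strip the text, split on "\n", strip each line, test the two checkbox
-- prefixes, append the stripped remainder after the 5-character prefix.
def pvPrefixA1 : List Char := ['-', ' ', '[', ' ', ']']   -- "- [ ]"
def pvPrefixA2 : List Char := ['*', ' ', '[', ' ', ']']   -- "* [ ]"

-- the body of A's for-loop (tasks is the accumulator, line the current line)
def pvLineStepA (tasks : List (List Char)) (line : List Char) : List (List Char) :=
  let line := PySem.Chars.strip line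
  if PySem.Chars.startswith line pvPrefixA1 || PySem.Chars.startswith line pvPrefixA2 then
    let task := PySem.Chars.strip (PySem.Chars.slice line (some 5) none)
    if task ≠ [] then tasks ++ [task] else tasks
  else tasks

def parse_outline_tasks (outline_text : String) : List String :=
  ((PySem.Chars.splitOn (PySem.Chars.strip outline_text.toList) ['\n']).foldl
      pvLineStepA []).map String.ofList

-- ===== PORT B =====
-- B (Source B): one pass with state 0 = skipping indent, 1..4 = bullet seen and
-- PREFIX[:state-1] of " [ ]" matched, 5 = collecting task text, -1 = dead line;
-- '\n' finalises the line; a sentinel '\n' is appended for the last line.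
def pvWs (c : Char) : Bool := c = ' ' || c = '\t' || c = '\r'   -- WS = " \t\r"
def pvPrefixB : List Char := [' ', '[', ' ', ']']               -- PREFIX = " [ ]"

def pvStepB : (List (List Char) × Int × List Char) → Char → (List (List Char) × Int × List Char)
  | (tasks, st, buf), ch =>
    if ch = '\n' then
      (if st = 5 then
         let task := PySem.Chars.strip buf
         if task ≠ [] then tasks ++ [task] else tasks
       else tasks, 0, [])
    else if st = 5 then (tasks, st, buf ++ [ch])
    else if st = -1 then (tasks, st, buf)
    else if st = 0 then
      if ch = '-' ∨ ch = '*' then (tasks, 1, buf)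
      else if ¬ pvWs ch then (tasks, -1, buf)
      else (tasks, st, buf)
    else if PySem.List.pyGet? pvPrefixB (st - 1) = some ch then (tasks, st + 1, buf)
    else (tasks, -1, buf)

def parse_outline_tasks_alt (outline_text : String) : List String :=
  (((outline_text.toList ++ ['\n']).foldl pvStepB ([], 0, [])).1).map String.ofList

-- ===== PRECONDITION & SPEC =====
def Spec_parse_outline_tasks (outline_text : String) (out : List String) : Prop := out = parse_outline_tasks_alt outline_text
instance (outline_text : String) (out : List String) : Decidable (Spec_parse_outline_tasks outline_text out) := by unfold Spec_parse_outline_tasks; infer_instance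

-- ===== CLAIM (what is proved, stated in full; the proofs are below) =====
def Claim_equal_parse_outline_tasks : Prop := ∀ (outline_text : String), Dom_parse_outline_tasks outline_text → Spec_parse_outline_tasks outline_text (parse_outline_tasks outline_text)

-- ===== LEMMAS AND PROOFS =====

-- proof-side model of splitting on '\n' with an accumulated current line
def pvSplitNl (pre : List Char) : List Char → List (List Char)
  | [] => [pre]
  | c :: rest => if c = '\n' then pre :: pvSplitNl [] rest else pvSplitNl (pre ++ [c]) rest

lemma pv_go_eq (fuel : Nat) (l cur : List Char) (acc : List (List Char)) (h : l.length < fuel) :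
    PySem.Chars.splitOn.go ['\n'] fuel l cur acc = acc.reverse ++ pvSplitNl cur.reverse l := by
  induction fuel generalizing l cur acc with
  | zero => omega
  | succ f ih =>
    cases l with
    | nil => rw [PySem.Chars.splitOn.go.eq_def]; simp [pvSplitNl]
    | cons c rest =>
      rw [PySem.Chars.splitOn.go.eq_def]
      simp only []
      by_cases hc : c = '\n'
      · subst hc
        rw [if_pos (by simp [List.isPrefixOf])]
        rw [ih _ _ _ (by simp at h ⊢; omega)]
        simp [pvSplitNl]
      · rw [if_neg (by simp [List.isPrefixOf]; intro hh; exact hc hh.symm)]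
        rw [ih _ _ _ (by simp at h ⊢; omega)]
        simp [pvSplitNl, hc]
lemma pv_splitOn_eq (cs : List Char) : PySem.Chars.splitOn cs ['\n'] = pvSplitNl [] cs := by
  rw [PySem.Chars.splitOn, pv_go_eq _ _ _ _ (by omega)]; simp

-- strip facts
-- rstrip facts
lemma pv_rstrip_append (xs : List Char) (d : Char) (ys : List Char)
    (h : PySem.Chars.isspace d = false) :
    PySem.Chars.rstrip (xs ++ d :: ys) = xs ++ d :: PySem.Chars.rstrip ys := by
  simp only [PySem.Chars.rstrip, List.reverse_append, List.reverse_cons]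
  rw [List.append_assoc, List.dropWhile_append]
  split_ifs with he
  · simp only [List.isEmpty_iff] at he
    simp [h, he]
  · simp

lemma pv_rstrip_cons (c : Char) (r : List Char) (h : PySem.Chars.isspace c = false) :
    PySem.Chars.rstrip (c :: r) = c :: PySem.Chars.rstrip r :=
  pv_rstrip_append [] c r h

lemma pv_rstrip_append_ws (x ws : List Char) (h : ∀ c ∈ ws, PySem.Chars.isspace c = true) :
    PySem.Chars.rstrip (x ++ ws) = PySem.Chars.rstrip x := by
  simp only [PySem.Chars.rstrip, List.reverse_append]
  rw [List.dropWhile_append]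
  rw [if_pos (by simp [List.dropWhile_eq_nil_iff]; intro c hc; exact h c (by simpa using hc))]

lemma pv_strip_append_ws (x ws : List Char) (h : ∀ c ∈ ws, PySem.Chars.isspace c = true) :
    PySem.Chars.strip (x ++ ws) = PySem.Chars.strip x := by
  simp only [PySem.Chars.strip, PySem.Chars.lstrip]
  rw [List.dropWhile_append]
  split_ifs with he
  · simp only [List.isEmpty_iff] at he
    rw [he]
    rw [show List.dropWhile PySem.Chars.isspace ws = [] from by
      simp [List.dropWhile_eq_nil_iff]; exact h]
  · exact pv_rstrip_append_ws _ _ h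

lemma pv_rstrip_decomp (x : List Char) :
    ∃ ws, x = PySem.Chars.rstrip x ++ ws ∧ ∀ c ∈ ws, PySem.Chars.isspace c = true := by
  refine ⟨(x.reverse.takeWhile PySem.Chars.isspace).reverse, ?_, ?_⟩
  · have h1 : x.reverse = List.takeWhile PySem.Chars.isspace x.reverse ++ List.dropWhile PySem.Chars.isspace x.reverse :=
      (List.takeWhile_append_dropWhile).symm
    have h2 : x = (List.takeWhile PySem.Chars.isspace x.reverse ++ List.dropWhile PySem.Chars.isspace x.reverse).reverse := by
      rw [← h1, List.reverse_reverse]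
    rw [PySem.Chars.rstrip]
    conv_lhs => rw [h2, List.reverse_append]
  · intro c hc
    exact List.mem_takeWhile_imp (by simpa using hc)

lemma pv_rstrip_prefix (x : List Char) : PySem.Chars.rstrip x <+: x := by
  obtain ⟨ws, hx, -⟩ := pv_rstrip_decomp x
  exact ⟨ws, hx.symm⟩

lemma pv_strip_rstrip (x : List Char) :
    PySem.Chars.strip (PySem.Chars.rstrip x) = PySem.Chars.strip x := by
  obtain ⟨ws, hx, hws⟩ := pv_rstrip_decomp x
  conv_rhs => rw [hx]
  exact (pv_strip_append_ws _ _ hws).symm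

lemma pv_lstrip_append_congr (pre pre' : List Char) (c : Char)
    (h : PySem.Chars.lstrip pre = PySem.Chars.lstrip pre') :
    PySem.Chars.lstrip (pre ++ [c]) = PySem.Chars.lstrip (pre' ++ [c]) := by
  simp only [PySem.Chars.lstrip] at *
  rw [List.dropWhile_append, List.dropWhile_append, h]

lemma pv_lstrip_nil_append (pre : List Char) (c : Char)
    (h : PySem.Chars.lstrip pre = []) (hc : PySem.Chars.isspace c = true) :
    PySem.Chars.lstrip (pre ++ [c]) = [] := by
  simp only [PySem.Chars.lstrip] at *
  rw [List.dropWhile_append, h]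
  simp [List.dropWhile, hc]

lemma pv_char_eq_of_toNat (c d : Char) (h : c.toNat = d.toNat) : c = d := by
  apply Char.ext
  apply UInt32.toNat_inj.mp
  exact h

lemma pv_issp_eq (c : Char) (h : pvDomChar c = true) (h2 : c ≠ '\n') :
    PySem.Chars.isspace c = pvWs c := by
  by_cases hsp : pvWs c = true
  · rw [hsp]
    rcases (by simpa [pvWs] using hsp : (c = ' ' ∨ c = '\t') ∨ c = '\r') with (h | h) | h <;>
      subst h <;> decide
  · rw [Bool.not_eq_true] at hsp
    rw [hsp]
    by_contra hne
    rw [Bool.not_eq_false] at hne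
    have h10 : c.toNat ≠ 10 := fun hh => h2 (pv_char_eq_of_toNat c '\n' (by simpa using hh))
    simp only [PySem.Chars.isspace, Bool.or_eq_true, Bool.and_eq_true, decide_eq_true_eq] at hne
    simp only [pvDomChar, Bool.or_eq_true, Bool.and_eq_true, decide_eq_true_eq, beq_iff_eq] at h
    have : c.toNat = 32 ∨ c.toNat = 9 ∨ c.toNat = 13 := by omega
    have hws : pvWs c = true := by
      rcases this with hh | hh | hh
      · simp [pvWs, pv_char_eq_of_toNat c ' ' (by simpa using hh)]
      · simp [pvWs, pv_char_eq_of_toNat c '\t' (by simpa using hh)]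
      · simp [pvWs, pv_char_eq_of_toNat c '\r' (by simpa using hh)]
    rw [hws] at hsp; exact absurd hsp (by simp)



-- DFA phase lemmas
lemma pv_step_dead (c : Char) (hc : ¬ c = '\n') (t : List (List Char)) (b : List Char) :
    pvStepB (t, -1, b) c = (t, -1, b) := by
  simp [pvStepB, hc]

lemma pv_dead (r : List Char) (h : '\n' ∉ r) (t : List (List Char)) (b : List Char) :
    r.foldl pvStepB (t, -1, b) = (t, -1, b) := by
  induction r with
  | nil => rfl
  | cons c r ih =>
    rw [List.foldl_cons, pv_step_dead c (fun hh => h (hh ▸ List.mem_cons_self)) t b]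
    exact ih (fun hm => h (List.mem_cons_of_mem _ hm))

lemma pv_collect (r : List Char) (h : '\n' ∉ r) (t : List (List Char)) (b : List Char) :
    r.foldl pvStepB (t, 5, b) = (t, 5, b ++ r) := by
  induction r generalizing b with
  | nil => simp
  | cons c r ih =>
    have hcne : ¬ c = '\n' := fun hh => h (hh ▸ List.mem_cons_self)
    have hstep : pvStepB (t, 5, b) c = (t, 5, b ++ [c]) := by
      simp [pvStepB, hcne]
    rw [List.foldl_cons, hstep, ih (fun hm => h (List.mem_cons_of_mem _ hm))]
    simp

lemma pv_skip (ws : List Char) (h : ∀ c ∈ ws, pvWs c = true) (t : List (List Char)) :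
    ws.foldl pvStepB (t, 0, []) = (t, 0, []) := by
  induction ws with
  | nil => rfl
  | cons c r ih =>
    have hc := h c List.mem_cons_self
    have h1 : ¬ c = '\n' := by
      rcases (by simpa [pvWs] using hc : (c = ' ' ∨ c = '\t') ∨ c = '\r') with (h|h)|h <;> subst h <;> decide
    have h2 : ¬ (c = '-' ∨ c = '*') := by
      rcases (by simpa [pvWs] using hc : (c = ' ' ∨ c = '\t') ∨ c = '\r') with (h|h)|h <;> subst h <;> decide
    have hstep : pvStepB (t, 0, []) c = (t, 0, []) := by simp [pvStepB, h1, h2, hc]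
    rw [List.foldl_cons, hstep]
    exact ih (fun c hm => h c (List.mem_cons_of_mem _ hm))

lemma pv_prefix_mismatch (r : List Char) (h : '\n' ∉ r) :
    ∀ (k : Nat), k < 4 → ¬ (pvPrefixB.drop k <+: r) → ∀ t : List (List Char),
      ∃ st b, r.foldl pvStepB (t, (k : Int) + 1, []) = (t, st, b) ∧ st ≠ 5 := by
  induction r with
  | nil =>
    intro k hk _ t
    exact ⟨(k : Int) + 1, [], rfl, by omega⟩
  | cons c r ih =>
    intro k hk hpre t
    have hc : ¬ c = '\n' := fun hh => h (hh ▸ List.mem_cons_self)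
    have hr : '\n' ∉ r := fun hm => h (List.mem_cons_of_mem _ hm)
    have hget : PySem.List.pyGet? pvPrefixB ((k : Int) + 1 - 1) = some pvPrefixB[k] := by
      have he : (k : Int) + 1 - 1 = (k : Int) := by ring
      rw [he, PySem.List.pyGet?_natCast, List.getElem?_eq_getElem (by simpa [pvPrefixB] using hk)]
      rfl
    have hne5 : ¬ ((k : Int) + 1 = 5) := by omega
    have hnem1 : ¬ ((k : Int) + 1 = -1) := by omega
    have hne0 : ¬ ((k : Int) + 1 = 0) := by omega
    by_cases hmatch : pvPrefixB[k] = c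
    · have hstep : pvStepB (t, (k : Int) + 1, []) c = (t, (k : Int) + 1 + 1, []) := by
        simp only [pvStepB, if_neg hc, if_neg hne5, if_neg hnem1, if_neg hne0]
        rw [if_pos (by rw [hget, hmatch])]
      rw [List.foldl_cons, hstep]
      have hdropk : pvPrefixB.drop k = pvPrefixB[k] :: pvPrefixB.drop (k + 1) :=
        List.drop_eq_getElem_cons (by simpa [pvPrefixB] using hk)
      by_cases hk3 : k = 3
      · exfalso
        apply hpre
        rw [hdropk, hmatch, hk3]
        simp [pvPrefixB]
      · have hk4 : k + 1 < 4 := by omega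
        have hpre' : ¬ (pvPrefixB.drop (k + 1) <+: r) := by
          intro hp
          exact hpre (by rw [hdropk, hmatch]; exact List.cons_prefix_cons.mpr ⟨rfl, hp⟩)
        have := ih hr (k + 1) hk4 hpre' t
        rw [show ((k : Int) + 1 + 1) = (((k + 1 : Nat) : Int) + 1) from by push_cast; ring]
        exact this
    · have hstep : pvStepB (t, (k : Int) + 1, []) c = (t, -1, []) := by
        simp only [pvStepB, if_neg hc, if_neg hne5, if_neg hnem1, if_neg hne0]
        rw [if_neg (by rw [hget]; simpa using fun hh => hmatch hh)]
      rw [List.foldl_cons, hstep]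
      exact ⟨-1, [], pv_dead r hr t [], by omega⟩

-- per-line facts about A's loop body
lemma pv_lineA_congr (t : List (List Char)) (l l' : List Char)
    (h : PySem.Chars.strip l = PySem.Chars.strip l') : pvLineStepA t l = pvLineStepA t l' := by
  unfold pvLineStepA
  rw [h]

lemma pv_lineA_of_strip_nil (t : List (List Char)) (l : List Char)
    (h : PySem.Chars.strip l = []) : pvLineStepA t l = t := by
  unfold pvLineStepA
  rw [h]
  rfl

lemma pv_dropWhile_congr (l : List Char) (h : ∀ c ∈ l, PySem.Chars.isspace c = pvWs c) :
    l.dropWhile PySem.Chars.isspace = l.dropWhile pvWs := by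
  induction l with
  | nil => rfl
  | cons c r ih =>
    simp only [List.dropWhile_cons, h c List.mem_cons_self]
    split_ifs
    · exact ih (fun c hm => h c (List.mem_cons_of_mem _ hm))
    · rfl

-- the per-line equivalence: one line (no newline) through B's machine,
-- finalised by the '\n', equals A's loop body on that line
lemma pv_line (line : List Char) (hd : ∀ c ∈ line, pvDomChar c = true) (hn : '\n' ∉ line)
    (t : List (List Char)) :
    (line ++ ['\n']).foldl pvStepB (t, 0, []) = (pvLineStepA t line, 0, []) := by
  have hiff : ∀ c ∈ line, PySem.Chars.isspace c = pvWs c :=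
    fun c hm => pv_issp_eq c (hd c hm) (fun hh => hn (hh ▸ hm))
  have hsplit : line.takeWhile pvWs ++ line.dropWhile pvWs = line :=
    List.takeWhile_append_dropWhile
  have hlstrip : PySem.Chars.lstrip line = line.dropWhile pvWs := by
    rw [PySem.Chars.lstrip, pv_dropWhile_congr line hiff]
  have hstrip : PySem.Chars.strip line = PySem.Chars.rstrip (line.dropWhile pvWs) := by
    rw [PySem.Chars.strip, hlstrip]
  have hskip : ∀ c ∈ line.takeWhile pvWs, pvWs c = true := fun c hm => List.mem_takeWhile_imp hm
  conv_lhs => rw [← hsplit, List.append_assoc, List.foldl_append, pv_skip _ hskip t]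
  have hsub : ∀ c ∈ line.dropWhile pvWs, c ∈ line := fun c hm => (List.dropWhile_sublist _).subset hm
  cases hrest : line.dropWhile pvWs with
  | nil =>
    rw [hrest] at hstrip
    have : PySem.Chars.strip line = [] := by rw [hstrip]; rfl
    rw [pv_lineA_of_strip_nil t line this]
    rfl
  | cons c r =>
    rw [hrest] at hstrip hsub
    have hcws : pvWs c = false := by
      have h2 := List.head?_dropWhile_not pvWs line
      rw [hrest] at h2
      simpa using h2
    have hcmem : c ∈ line := hsub c List.mem_cons_self
    have hcnl : ¬ c = '\n' := fun hh => hn (hh ▸ hcmem)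
    have hrnl : '\n' ∉ r := fun hm => hn (hsub _ (List.mem_cons_of_mem _ hm))
    have hcsp : PySem.Chars.isspace c = false := by rw [hiff c hcmem]; exact hcws
    have hstrip2 : PySem.Chars.strip line = c :: PySem.Chars.rstrip r := by
      rw [hstrip, pv_rstrip_cons c r hcsp]
    by_cases hbul : c = '-' ∨ c = '*'
    · have hstep : pvStepB (t, 0, []) c = (t, 1, []) := by
        simp [pvStepB, hcnl, hbul]
      by_cases hpref : pvPrefixB <+: r
      · obtain ⟨body, hbody⟩ := hpref
        subst hbody
        have hbnl : '\n' ∉ body := fun hm => hrnl (List.mem_append_right _ hm)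
        rw [List.cons_append, List.foldl_cons, hstep, List.append_assoc, List.foldl_append,
          show pvPrefixB.foldl pvStepB (t, 1, []) = (t, 5, []) from rfl,
          List.foldl_append, pv_collect body hbnl t []]
        simp only [List.nil_append]
        have hfin : pvStepB (t, 5, body) '\n' =
            (if PySem.Chars.strip body ≠ [] then t ++ [PySem.Chars.strip body] else t, 0, []) := by
          simp [pvStepB]
        rw [List.foldl_cons, List.foldl_nil, hfin]
        have hrs : PySem.Chars.rstrip (pvPrefixB ++ body) =
            pvPrefixB ++ PySem.Chars.rstrip body := by
          show PySem.Chars.rstrip ([' ', '[', ' '] ++ ']' :: body) = _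
          rw [pv_rstrip_append [' ', '[', ' '] ']' body (by decide)]
          rfl
        rw [hrs] at hstrip2
        have htask : PySem.Chars.strip
            (PySem.Chars.slice (PySem.Chars.strip line) (some 5) none) =
            PySem.Chars.strip body := by
          rw [hstrip2]
          show PySem.Chars.strip (PySem.Chars.slice
            (c :: ' ' :: '[' :: ' ' :: ']' :: PySem.Chars.rstrip body) (some 5) none) = _
          rw [show PySem.Chars.slice (c :: ' ' :: '[' :: ' ' :: ']' :: PySem.Chars.rstrip body)
              (some 5) none = PySem.Chars.rstrip body from by simp [pysem]]
          exact pv_strip_rstrip body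
        have hsw : (PySem.Chars.startswith (PySem.Chars.strip line) pvPrefixA1 ||
            PySem.Chars.startswith (PySem.Chars.strip line) pvPrefixA2) = true := by
          rcases hbul with h | h <;> subst h
          · have h1 : PySem.Chars.startswith (PySem.Chars.strip line) pvPrefixA1 = true := by
              rw [PySem.Chars.startswith_iff, hstrip2]
              exact List.cons_prefix_cons.mpr ⟨rfl, List.prefix_append _ _⟩
            rw [h1, Bool.true_or]
          · have h1 : PySem.Chars.startswith (PySem.Chars.strip line) pvPrefixA2 = true := by
              rw [PySem.Chars.startswith_iff, hstrip2]
              exact List.cons_prefix_cons.mpr ⟨rfl, List.prefix_append _ _⟩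
            rw [h1, Bool.or_true]
        simp only [pvLineStepA]
        rw [hsw, htask]
        simp
      · rw [List.cons_append, List.foldl_cons, hstep, List.foldl_append]
        obtain ⟨st, b, heq, hst⟩ := pv_prefix_mismatch r hrnl 0 (by omega)
          (by simpa using hpref) t
        norm_num at heq
        rw [heq]
        have hfin : pvStepB (t, st, b) '\n' = (t, 0, []) := by
          simp [pvStepB, hst]
        rw [List.foldl_cons, List.foldl_nil, hfin]
        have hnp : ¬ (pvPrefixB <+: PySem.Chars.rstrip r) :=
          fun hp => hpref (hp.trans (pv_rstrip_prefix r))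
        have hf1 : PySem.Chars.startswith (PySem.Chars.strip line) pvPrefixA1 = false := by
          rw [← Bool.not_eq_true, PySem.Chars.startswith_iff, hstrip2]
          intro hp
          exact hnp (List.cons_prefix_cons.mp hp).2
        have hf2 : PySem.Chars.startswith (PySem.Chars.strip line) pvPrefixA2 = false := by
          rw [← Bool.not_eq_true, PySem.Chars.startswith_iff, hstrip2]
          intro hp
          exact hnp (List.cons_prefix_cons.mp hp).2
        simp only [pvLineStepA]
        rw [hf1, hf2]
        rfl
    · have hstep : pvStepB (t, 0, []) c = (t, -1, []) := by
        simp [pvStepB, hcnl, hbul, hcws]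
      rw [List.cons_append, List.foldl_cons, hstep, List.foldl_append,
        pv_dead r hrnl t [], List.foldl_cons, List.foldl_nil]
      have hfin : pvStepB (t, -1, []) '\n' = (t, 0, []) := by simp [pvStepB]
      rw [hfin]
      push Not at hbul
      have hf1 : PySem.Chars.startswith (PySem.Chars.strip line) pvPrefixA1 = false := by
        rw [← Bool.not_eq_true, PySem.Chars.startswith_iff, hstrip2]
        intro hp
        exact hbul.1 ((List.cons_prefix_cons.mp hp).1.symm)
      have hf2 : PySem.Chars.startswith (PySem.Chars.strip line) pvPrefixA2 = false := by
        rw [← Bool.not_eq_true, PySem.Chars.startswith_iff, hstrip2]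
        intro hp
        exact hbul.2 ((List.cons_prefix_cons.mp hp).1.symm)
      simp only [pvLineStepA]
      rw [hf1, hf2]
      rfl

-- the whole text: B's single pass equals folding A's loop body over the '\n'-split lines
lemma pv_main (cs : List Char) : ∀ (pre : List Char) (t : List (List Char)),
    (∀ c ∈ cs, pvDomChar c = true) → (∀ c ∈ pre, pvDomChar c = true) → '\n' ∉ pre →
    (cs ++ ['\n']).foldl pvStepB (pre.foldl pvStepB (t, 0, [])) =
      ((pvSplitNl pre cs).foldl pvLineStepA t, 0, []) := by
  induction cs with
  | nil =>
    intro pre t _ hdp hnp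
    have h := pv_line pre hdp hnp t
    rw [List.foldl_append] at h
    simpa [pvSplitNl] using h
  | cons c cs ih =>
    intro pre t hdc hdp hnp
    by_cases hc : c = '\n'
    · subst hc
      rw [List.cons_append, List.foldl_cons]
      have hline := pv_line pre hdp hnp t
      rw [List.foldl_append, List.foldl_cons, List.foldl_nil] at hline
      rw [hline]
      have h2 := ih [] (pvLineStepA t pre)
        (fun c hm => hdc c (List.mem_cons_of_mem _ hm)) (by simp) (by simp)
      simp only [List.foldl_nil] at h2
      rw [h2]
      simp [pvSplitNl]
    · rw [List.cons_append, List.foldl_cons,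
        show pvStepB (pre.foldl pvStepB (t, 0, [])) c = (pre ++ [c]).foldl pvStepB (t, 0, []) from by
          rw [List.foldl_append]; rfl]
      rw [ih (pre ++ [c]) t (fun c hm => hdc c (List.mem_cons_of_mem _ hm))
        (fun d hm => by
          rcases List.mem_append.mp hm with h | h
          · exact hdp d h
          · have hdc2 : d = c := by simpa using h
            subst hdc2
            exact hdc d List.mem_cons_self)
        (by
          intro hm
          rcases List.mem_append.mp hm with h | h
          · exact hnp h
          · exact hc ((by simpa using h : '\n' = c)).symm)]
      simp [pvSplitNl, hc]

-- folding A's loop body over pvSplitNl is invariant under stripping the text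
lemma pv_fold_congr (cs : List Char) : ∀ (pre pre' : List Char) (t : List (List Char)),
    PySem.Chars.lstrip pre = PySem.Chars.lstrip pre' →
    (pvSplitNl pre cs).foldl pvLineStepA t = (pvSplitNl pre' cs).foldl pvLineStepA t := by
  induction cs with
  | nil =>
    intro pre pre' t h
    simp only [pvSplitNl, List.foldl_cons, List.foldl_nil]
    exact pv_lineA_congr t pre pre' (by rw [PySem.Chars.strip, PySem.Chars.strip, h])
  | cons c cs ih =>
    intro pre pre' t h
    by_cases hc : c = '\n'
    · subst hc
      simp only [pvSplitNl, ite_true, List.foldl_cons]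
      rw [pv_lineA_congr t pre pre' (by rw [PySem.Chars.strip, PySem.Chars.strip, h])]
    · simp only [pvSplitNl, if_neg hc]
      exact ih _ _ t (pv_lstrip_append_congr pre pre' c h)

lemma pv_fold_ws (ws : List Char) : ∀ (_ : ∀ c ∈ ws, PySem.Chars.isspace c = true)
    (pre : List Char) (t : List (List Char)),
    (pvSplitNl pre ws).foldl pvLineStepA t = pvLineStepA t pre := by
  induction ws with
  | nil => intro _ pre t; simp [pvSplitNl]
  | cons c ws ih =>
    intro h pre t
    by_cases hc : c = '\n'
    · subst hc
      simp only [pvSplitNl, ite_true, List.foldl_cons]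
      rw [ih (fun c hm => h c (List.mem_cons_of_mem _ hm)) [] (pvLineStepA t pre)]
      exact pv_lineA_of_strip_nil _ [] rfl
    · simp only [pvSplitNl, if_neg hc]
      rw [ih (fun c hm => h c (List.mem_cons_of_mem _ hm)) (pre ++ [c]) t]
      exact pv_lineA_congr t _ _
        (pv_strip_append_ws pre [c] (by simpa using h c List.mem_cons_self))

lemma pv_fold_append_ws (cs : List Char) : ∀ (ws : List Char),
    (∀ c ∈ ws, PySem.Chars.isspace c = true) → ∀ (pre : List Char) (t : List (List Char)),
    (pvSplitNl pre (cs ++ ws)).foldl pvLineStepA t = (pvSplitNl pre cs).foldl pvLineStepA t := by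
  induction cs with
  | nil =>
    intro ws h pre t
    rw [List.nil_append, pv_fold_ws ws h pre t]
    simp [pvSplitNl]
  | cons c cs ih =>
    intro ws h pre t
    by_cases hc : c = '\n'
    · subst hc
      simp only [pvSplitNl, List.cons_append, ite_true, List.foldl_cons]
      rw [ih ws h [] (pvLineStepA t pre)]
    · simp only [pvSplitNl, List.cons_append, if_neg hc]
      exact ih ws h (pre ++ [c]) t

lemma pv_fold_ws_prepend (ws : List Char) : ∀ (_ : ∀ c ∈ ws, PySem.Chars.isspace c = true)
    (cs pre : List Char) (t : List (List Char)), PySem.Chars.lstrip pre = [] →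
    (pvSplitNl pre (ws ++ cs)).foldl pvLineStepA t = (pvSplitNl [] cs).foldl pvLineStepA t := by
  induction ws with
  | nil =>
    intro _ cs pre t hp
    rw [List.nil_append]
    exact pv_fold_congr cs pre [] t (by rw [hp]; rfl)
  | cons c ws ih =>
    intro h cs pre t hp
    by_cases hc : c = '\n'
    · subst hc
      simp only [pvSplitNl, List.cons_append, ite_true, List.foldl_cons]
      rw [pv_lineA_of_strip_nil t pre (by rw [PySem.Chars.strip, hp]; rfl)]
      exact ih (fun c hm => h c (List.mem_cons_of_mem _ hm)) cs [] t rfl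
    · simp only [pvSplitNl, List.cons_append, if_neg hc]
      exact ih (fun c hm => h c (List.mem_cons_of_mem _ hm)) cs (pre ++ [c]) t
        (pv_lstrip_nil_append pre c hp (h c List.mem_cons_self))

lemma pv_fold_strip (cs : List Char) (t : List (List Char)) :
    (pvSplitNl [] (PySem.Chars.strip cs)).foldl pvLineStepA t =
      (pvSplitNl [] cs).foldl pvLineStepA t := by
  obtain ⟨ws2, hdec, hws2⟩ := pv_rstrip_decomp (PySem.Chars.lstrip cs)
  have hsplit : cs.takeWhile PySem.Chars.isspace ++ PySem.Chars.lstrip cs = cs := by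
    rw [PySem.Chars.lstrip]
    exact List.takeWhile_append_dropWhile
  conv_rhs => rw [← hsplit]
  rw [pv_fold_ws_prepend _ (fun c hm => List.mem_takeWhile_imp hm) _ [] t rfl]
  conv_rhs => rw [hdec]
  rw [pv_fold_append_ws _ _ hws2 [] t]
  rfl

-- ===== VERDICT (by name: the statement is the Claim_ definition above) =====
theorem parse_outline_tasks_spec : Claim_equal_parse_outline_tasks := by
  intro s hdom
  unfold Spec_parse_outline_tasks parse_outline_tasks parse_outline_tasks_alt
  have hd : ∀ c ∈ s.toList, pvDomChar c = true := by
    intro c hc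
    exact List.all_eq_true.mp hdom c hc
  rw [pv_splitOn_eq, pv_fold_strip s.toList []]
  have hmain := pv_main s.toList [] [] hd (by simp) (by simp)
  simp only [List.foldl_nil] at hmain
  rw [hmain]
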